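-- pv_equiv track=rewrite | github.com/AdvancedScientificResearchProjects/Hyperbolic_Field_BloodPlasma_Study | original_research/reports/2026-02-26_llm-vision-analysis/generate_charts.py | count_by_channel_and_stage
-- ===== SOURCE A (Python) =====
-- def count_by_channel_and_stage(photos):
--     """Count stage occurrences per channel."""
--     result = {}
--     for p in photos:
--         ch = p.get("channel", "unknown")
--         # Normalize channel names
--         if ch in ("ch19_acceleration", "ch19"):
--             ch = "ch19"
--         elif ch in ("ch21_deceleration", "ch21"):
--             ch = "ch21"
--         elif ch in ("control", "ch0"):
--             ch = "control"
--         else: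
--             continue
--         stage = p.get("clot_stage", "none")
--         if ch not in result:
--             result[ch] = {}
--         result[ch][stage] = result[ch].get(stage, 0) + 1
--     return result
-- ===== SOURCE B (Python) =====
-- NORM = {
--     "ch19_acceleration": "ch19",
--     "ch19": "ch19",
--     "ch21_deceleration": "ch21",
--     "ch21": "ch21",
--     "control": "control",
--     "ch0": "control",
-- }
--
--
-- def count_by_channel_and_stage(photos):
--     """Count stage occurrences per channel (group first, then count)."""
--     grouped = {}
--     for p in photos:
--         ch = NORM.get(p.get("channel", "unknown"))
--         if ch is None:
--             continue
--         grouped.setdefault(ch, []).append(p.get("clot_stage", "none"))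
--     return {ch: {s: st.count(s) for s in dict.fromkeys(st)}
--             for ch, st in grouped.items()}
-- ===== Notes on version B (the rewrite author's own statement) =====
-- stated objective: alternative
-- what changed: Replaces A's single-pass nested running count (dict-of-dicts updated per photo) by a two-phase build-index-then-reduce: first group clot stages into lists per normalized channel via a normalization table, then count each channel's list with an ordered dedup + list.count comprehension.
import Mathlib
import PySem

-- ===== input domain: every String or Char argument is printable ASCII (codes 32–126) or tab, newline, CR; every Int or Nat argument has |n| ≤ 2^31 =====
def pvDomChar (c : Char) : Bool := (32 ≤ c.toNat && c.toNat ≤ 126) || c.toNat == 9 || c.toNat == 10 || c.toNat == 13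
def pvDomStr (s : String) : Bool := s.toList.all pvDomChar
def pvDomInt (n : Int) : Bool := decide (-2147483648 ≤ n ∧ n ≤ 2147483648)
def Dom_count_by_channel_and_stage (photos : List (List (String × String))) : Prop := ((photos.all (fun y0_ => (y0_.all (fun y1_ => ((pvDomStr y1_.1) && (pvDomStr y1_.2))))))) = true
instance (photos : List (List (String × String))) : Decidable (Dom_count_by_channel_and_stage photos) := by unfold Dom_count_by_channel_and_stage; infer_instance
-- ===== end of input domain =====

-- B groups stages into lists per normalized channel first, then counts each list; A keeps one running dict-of-counts. Same return value, proved below.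

-- ===== PORT A =====
-- one loop iteration of A: normalize the channel inline (same branch order), 'continue' on unknown, then bump result[ch][stage]
def pvStepA (result : PySem.Dict String (PySem.Dict String Int)) (p : List (String × String)) :
    PySem.Dict String (PySem.Dict String Int) :=
  let ch := (PySem.Dict.mk p).getD "channel" "unknown"
  let chN : Option String :=
    if ch = "ch19_acceleration" ∨ ch = "ch19" then some "ch19"
    else if ch = "ch21_deceleration" ∨ ch = "ch21" then some "ch21"
    else if ch = "control" ∨ ch = "ch0" then some "control"
    else none
  match chN with
  | none => result
  | some ch =>
    let stage := (PySem.Dict.mk p).getD "clot_stage" "none"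
    let result := if result.contains ch then result else result.insert ch PySem.Dict.empty
    result.modify ch PySem.Dict.empty (fun inner => inner.insert stage (inner.getD stage 0 + 1))

def count_by_channel_and_stage (photos : List (List (String × String))) : List (String × List (String × Int)) :=
  let result := photos.foldl pvStepA PySem.Dict.empty
  result.items.map (fun q => (q.1, q.2.items))

-- ===== PORT B =====
def pvNORM : PySem.Dict String String :=
  PySem.Dict.ofList [("ch19_acceleration", "ch19"), ("ch19", "ch19"),
                     ("ch21_deceleration", "ch21"), ("ch21", "ch21"),
                     ("control", "control"), ("ch0", "control")]

-- one loop iteration of B: table lookup, skip on miss, append the stage to the channel's list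
def pvStepB (g : PySem.Dict String (List String)) (p : List (String × String)) :
    PySem.Dict String (List String) :=
  match pvNORM.get? ((PySem.Dict.mk p).getD "channel" "unknown") with
  | none => g
  | some c => g.modify c [] (fun st => st ++ [(PySem.Dict.mk p).getD "clot_stage" "none"])

def count_by_channel_and_stage_alt (photos : List (List (String × String))) : List (String × List (String × Int)) :=
  let grouped := photos.foldl pvStepB PySem.Dict.empty
  grouped.items.map (fun q => (q.1, (PySem.Set.ofList q.2).map (fun s => (s, (q.2.count s : Int)))))

-- ===== PRECONDITION & SPEC =====
def Spec_count_by_channel_and_stage (photos : List (List (String × String))) (out : List (String × List (String × Int))) : Prop := out = count_by_channel_and_stage_alt photos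
instance (photos : List (List (String × String))) (out : List (String × List (String × Int))) : Decidable (Spec_count_by_channel_and_stage photos out) := by unfold Spec_count_by_channel_and_stage; infer_instance

-- ===== CLAIM (what is proved, stated in full; the proofs are below) =====
def Claim_equal_count_by_channel_and_stage : Prop := ∀ (photos : List (List (String × String))), Dom_count_by_channel_and_stage photos → Spec_count_by_channel_and_stage photos (count_by_channel_and_stage photos)

-- ===== LEMMAS AND PROOFS =====

-- A's accumulator is B's grouped dict with every list replaced by its counter
def pvMapVals (g : PySem.Dict String (List String)) : PySem.Dict String (PySem.Dict String Int) :=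
  PySem.Dict.mk (g.items.map (fun q => (q.1, PySem.Dict.counter q.2)))

theorem pvMapVals_get? (g : PySem.Dict String (List String)) (c : String) :
    (pvMapVals g).get? c = (g.get? c).map (fun st => PySem.Dict.counter st) := by
  obtain ⟨l⟩ := g
  induction l with
  | nil => simp [pvMapVals, PySem.Dict.get?]
  | cons q l ih =>
    obtain ⟨k, v⟩ := q
    simp only [pvMapVals, List.map_cons, PySem.Dict.get?_mk_cons]
    split <;> simp_all [pvMapVals]

theorem pvMapVals_contains (g : PySem.Dict String (List String)) (c : String) :
    (pvMapVals g).contains c = g.contains c := by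
  rw [PySem.Dict.contains_eq_isSome_get?, PySem.Dict.contains_eq_isSome_get?, pvMapVals_get?]
  cases g.get? c <;> rfl

theorem pvMapVals_getD (g : PySem.Dict String (List String)) (c : String) :
    (pvMapVals g).getD c PySem.Dict.empty = PySem.Dict.counter (g.getD c []) := by
  rw [PySem.Dict.getD_eq_get?_getD, PySem.Dict.getD_eq_get?_getD, pvMapVals_get?]
  cases g.get? c <;> rfl

theorem pvMapVals_insert (g : PySem.Dict String (List String)) (c : String) (v : List String) :
    pvMapVals (g.insert c v) = (pvMapVals g).insert c (PySem.Dict.counter v) := by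
  apply PySem.Dict.ext
  show ((g.insert c v).items).map (fun q => (q.1, PySem.Dict.counter q.2)) = _
  rw [PySem.Dict.items_insert, PySem.Dict.items_insert, pvMapVals_contains]
  have hitems : (pvMapVals g).items = g.items.map (fun q => (q.1, PySem.Dict.counter q.2)) := rfl
  rw [hitems]
  split
  · rw [List.map_map, List.map_map]
    apply List.map_congr_left
    intro q _
    by_cases hq : q.1 = c <;> simp [hq]
  · first | rfl | simp [List.map_append]

-- B's table lookup computes exactly A's normalization chain
set_option maxRecDepth 8192 in
theorem pvNORM_get? (ch : String) : pvNORM.get? ch =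
    (if ch = "ch19_acceleration" ∨ ch = "ch19" then some "ch19"
     else if ch = "ch21_deceleration" ∨ ch = "ch21" then some "ch21"
     else if ch = "control" ∨ ch = "ch0" then some "control"
     else none) := by
  rw [show pvNORM = PySem.Dict.mk
        [("ch19_acceleration", "ch19"), ("ch19", "ch19"),
         ("ch21_deceleration", "ch21"), ("ch21", "ch21"),
         ("control", "control"), ("ch0", "control")] from by decide]
  simp only [PySem.Dict.get?_mk_cons]
  by_cases h1 : ch = "ch19_acceleration" <;> by_cases h2 : ch = "ch19" <;>
    by_cases h3 : ch = "ch21_deceleration" <;> by_cases h4 : ch = "ch21" <;>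
    by_cases h5 : ch = "control" <;> by_cases h6 : ch = "ch0" <;>
    first
    | (subst_vars; decide)
    | (simp only [beq_iff_eq]
       rw [if_neg (Ne.symm h1), if_neg (Ne.symm h2), if_neg (Ne.symm h3),
           if_neg (Ne.symm h4), if_neg (Ne.symm h5), if_neg (Ne.symm h6)]
       simp [h1, h2, h3, h4, h5, h6, PySem.Dict.get?])

-- the kept branch: A's bump of result[ch][stage] equals B's append of the stage, through pvMapVals
theorem pvStep_core (g : PySem.Dict String (List String)) (c s : String) :
    (if (pvMapVals g).contains c then pvMapVals g
     else (pvMapVals g).insert c PySem.Dict.empty).modify c PySem.Dict.empty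
        (fun inner => inner.insert s (inner.getD s 0 + 1))
    = pvMapVals (g.modify c [] (fun st => st ++ [s])) := by
  simp only [PySem.Dict.modify]
  rw [pvMapVals_insert, PySem.Dict.counter_append_singleton]
  simp only [PySem.Dict.modify]
  rw [← pvMapVals_getD]
  by_cases h : (pvMapVals g).contains c = true
  · rw [if_pos h]
  · rw [if_neg h, PySem.Dict.getD_insert_self, PySem.Dict.insert_insert_self]
    have hg : (pvMapVals g).getD c PySem.Dict.empty = PySem.Dict.empty :=
      PySem.Dict.getD_of_not_contains (pvMapVals g) PySem.Dict.empty (by simpa using h)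
    rw [hg]

-- one loop step of A equals one loop step of B, carried through pvMapVals
theorem pvStep_comm (g : PySem.Dict String (List String)) (p : List (String × String)) :
    pvStepA (pvMapVals g) p = pvMapVals (pvStepB g p) := by
  simp only [pvStepA, pvStepB, pvNORM_get?]
  generalize (if (PySem.Dict.mk p).getD "channel" "unknown" = "ch19_acceleration" ∨
        (PySem.Dict.mk p).getD "channel" "unknown" = "ch19" then some "ch19"
      else if (PySem.Dict.mk p).getD "channel" "unknown" = "ch21_deceleration" ∨
        (PySem.Dict.mk p).getD "channel" "unknown" = "ch21" then some "ch21"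
      else if (PySem.Dict.mk p).getD "channel" "unknown" = "control" ∨
        (PySem.Dict.mk p).getD "channel" "unknown" = "ch0" then some "control"
      else none) = o
  cases o with
  | none => rfl
  | some c => exact pvStep_core g c _

theorem pv_fold_comm (photos : List (List (String × String))) (g : PySem.Dict String (List String)) :
    photos.foldl pvStepA (pvMapVals g) = pvMapVals (photos.foldl pvStepB g) := by
  induction photos generalizing g with
  | nil => rfl
  | cons p ps ih => simp only [List.foldl_cons, pvStep_comm, ih]

-- ===== VERDICT (by name: the statement is the Claim_ definition above) =====
theorem count_by_channel_and_stage_spec : Claim_equal_count_by_channel_and_stage := by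
  intro photos _
  unfold Spec_count_by_channel_and_stage count_by_channel_and_stage count_by_channel_and_stage_alt
  dsimp only
  have hempty : (PySem.Dict.empty : PySem.Dict String (PySem.Dict String Int)) = pvMapVals PySem.Dict.empty := rfl
  rw [hempty, pv_fold_comm]
  have hitems : (pvMapVals (photos.foldl pvStepB PySem.Dict.empty)).items
      = (photos.foldl pvStepB PySem.Dict.empty).items.map (fun q => (q.1, PySem.Dict.counter q.2)) := rfl
  rw [hitems, List.map_map]
  apply List.map_congr_left
  intro q _
  simp [PySem.Dict.items_counter]
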